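-- pv_equiv track=rewrite | github.com/angeliqux/Group_Project | Script.py | nom_prot
-- ===== SOURCE A (Python) =====
-- def nom_prot(PDB_fichier) :
--     """Fonction qui récupère le nom de la protéine étudiée dans le fichier PDB.
--     input: PDB_fichier, qui est une liste contenant toutes les lignes d'un fichier PDB
--     output: chaine de caractère contenant le nom de la protéine"""
--     nom=""
--     for ligne in PDB_fichier:
--         if ligne.startswith ("COMPND") and "MOLECULE:" in ligne: #recherche le nom de la molécule
--             nom= (ligne[20:])
--         if ";" in nom: #si le document pdb est issu d'un document txt il contient des ';' à la fin de chaque ligne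
--                 nom= nom.replace(";", "")
--     return nom
-- ===== SOURCE B (Python) =====
-- def nom_prot(PDB_fichier):
--     """Scan from the end and return immediately on the last matching COMPND/MOLECULE line."""
--     for ligne in reversed(PDB_fichier):
--         if ligne.startswith("COMPND") and "MOLECULE:" in ligne:
--             return ligne[20:].replace(";", "")
--     return ""
-- ===== Notes on version B (the rewrite author's own statement) =====
-- stated objective: idiomatic
-- what changed: Replaces the forward keep-last accumulator with a per-iteration conditional ';'-strip by a single reverse scan that returns the last matching line's tail, stripped of ';', immediately (early exit), and '' when no line matches.
import Mathlib
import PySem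

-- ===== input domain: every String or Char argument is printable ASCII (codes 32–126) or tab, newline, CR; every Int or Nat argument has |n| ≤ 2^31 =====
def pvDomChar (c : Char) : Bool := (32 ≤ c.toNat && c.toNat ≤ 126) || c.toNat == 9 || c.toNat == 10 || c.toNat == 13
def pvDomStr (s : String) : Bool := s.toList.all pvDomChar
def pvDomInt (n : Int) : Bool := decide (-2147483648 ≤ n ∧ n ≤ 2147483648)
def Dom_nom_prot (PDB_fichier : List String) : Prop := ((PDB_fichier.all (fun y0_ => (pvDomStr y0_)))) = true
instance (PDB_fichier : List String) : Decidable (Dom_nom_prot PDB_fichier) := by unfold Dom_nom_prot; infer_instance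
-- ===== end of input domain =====

-- B scans the list from the end and returns on the last matching line immediately,
-- instead of A's forward keep-last accumulator with a per-iteration ';' strip.

-- ===== PORT A =====
def nom_prot (PDB_fichier : List String) : String :=
  PDB_fichier.foldl
    (fun nom ligne =>
      let nom :=
        if PySem.Str.startswith ligne "COMPND" && PySem.Str.isIn "MOLECULE:" ligne then
          PySem.Str.slice ligne (some 20) none
        else nom
      if PySem.Str.isIn ";" nom then PySem.Str.replace nom ";" "" else nom)
    ""

-- ===== PORT B =====
def nomProtRevScan : List String → String
  | [] => ""
  | ligne :: rest =>
    if PySem.Str.startswith ligne "COMPND" && PySem.Str.isIn "MOLECULE:" ligne then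
      PySem.Str.replace (PySem.Str.slice ligne (some 20) none) ";" ""
    else nomProtRevScan rest

def nom_prot_alt (PDB_fichier : List String) : String :=
  nomProtRevScan PDB_fichier.reverse

-- ===== PRECONDITION & SPEC =====
def Spec_nom_prot (PDB_fichier : List String) (out : String) : Prop := out = nom_prot_alt PDB_fichier
instance (PDB_fichier : List String) (out : String) : Decidable (Spec_nom_prot PDB_fichier out) := by unfold Spec_nom_prot; infer_instance

-- ===== CLAIM (what is proved, stated in full; the proofs are below) =====
def Claim_equal_nom_prot : Prop := ∀ (PDB_fichier : List String), Dom_nom_prot PDB_fichier → Spec_nom_prot PDB_fichier (nom_prot PDB_fichier)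

-- ===== LEMMAS AND PROOFS =====

-- replace s ";" "" removes exactly the semicolons: it is filter on the character list
theorem replace_semi_go (fuel : Nat) (l acc : List Char) (h : l.length ≤ fuel) :
    PySem.Chars.replace.go [';'] [] fuel l acc = acc.reverse ++ l.filter (· ≠ ';') := by
  induction fuel generalizing l acc with
  | zero =>
    cases l with
    | nil => simp [PySem.Chars.replace.go]
    | cons c t => simp at h
  | succ n ih =>
    cases l with
    | nil => simp [PySem.Chars.replace.go]
    | cons c t =>
      simp only [PySem.Chars.replace.go]
      by_cases hc : c = ';'
      · subst hc
        rw [if_pos (by simp [List.isPrefixOf])]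
        rw [show List.drop [';'].length (';' :: t) = t from rfl]
        rw [show ([] : List Char).reverse ++ acc = acc from rfl]
        rw [ih t acc (by simpa using h)]
        simp
      · rw [if_neg (by simp [List.isPrefixOf]; exact fun h => hc h.symm)]
        rw [ih t (c :: acc) (by simpa using h)]
        rw [List.filter_cons_of_pos (by simp [hc])]
        simp

theorem chars_replace_semi (l : List Char) :
    PySem.Chars.replace l [';'] [] = l.filter (· ≠ ';') := by
  rw [PySem.Chars.replace, if_neg (by decide)]
  rw [replace_semi_go l.length l [] le_rfl]
  simp

theorem replace_semi_eq_filter (s : String) :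
    PySem.Str.replace s ";" "" = String.ofList (s.toList.filter (· ≠ ';')) := by
  rw [PySem.Str.replace, show (";" : String).toList = [';'] from rfl,
      show ("" : String).toList = [] from rfl, chars_replace_semi]

theorem isIn_semi_eq_false_iff (s : String) :
    PySem.Str.isIn ";" s = false ↔ ';' ∉ s.toList := by
  rw [show PySem.Str.isIn ";" s = PySem.Chars.isIn ";".toList s.toList from by simp,
      PySem.Chars.isIn_eq_false_iff]
  constructor
  · intro h hm
    exact h (by obtain ⟨l1, l2, hl⟩ := List.append_of_mem hm; exact ⟨l1, l2, by simp [hl]⟩)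
  · intro h hinf
    exact h (hinf.mem (by simp [show (";" : String).toList = [';'] from rfl]))

-- if s has no ';', replacing does nothing
theorem replace_semi_of_not_isIn (s : String) (h : PySem.Str.isIn ";" s = false) :
    PySem.Str.replace s ";" "" = s := by
  rw [replace_semi_eq_filter, List.filter_eq_self.mpr, String.ofList_toList]
  intro a ha
  simp only [ne_eq, decide_eq_true_eq]
  rintro rfl
  exact (isIn_semi_eq_false_iff s).mp h ha

-- the replaced string has no ';'
theorem isIn_semi_replace (s : String) :
    PySem.Str.isIn ";" (PySem.Str.replace s ";" "") = false := by
  rw [replace_semi_eq_filter, isIn_semi_eq_false_iff]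
  simp

-- A's loop state is always ';'-free after at least the initial "" (which is ';'-free)
theorem foldl_state_semi_free (xs : List String) (nom : String)
    (h : PySem.Str.isIn ";" nom = false) :
    PySem.Str.isIn ";"
      (xs.foldl (fun nom ligne =>
        let nom :=
          if PySem.Str.startswith ligne "COMPND" && PySem.Str.isIn "MOLECULE:" ligne then
            PySem.Str.slice ligne (some 20) none
          else nom
        if PySem.Str.isIn ";" nom then PySem.Str.replace nom ";" "" else nom) nom) = false := by
  induction xs generalizing nom with
  | nil => simpa using h
  | cons x t ih =>
    simp only [List.foldl_cons]
    apply ih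
    set n1 := if PySem.Str.startswith x "COMPND" && PySem.Str.isIn "MOLECULE:" x then
        PySem.Str.slice x (some 20) none else nom with hn1
    by_cases hs : PySem.Str.isIn ";" n1 = true
    · rw [if_pos hs]; exact isIn_semi_replace n1
    · rw [if_neg hs]; simpa using hs

-- main characterisation: A's fold from a ';'-free state equals B's reverse scan
theorem foldl_eq_revScan (xs : List String) (nom : String)
    (h : PySem.Str.isIn ";" nom = false) :
    xs.foldl (fun nom ligne =>
        let nom :=
          if PySem.Str.startswith ligne "COMPND" && PySem.Str.isIn "MOLECULE:" ligne then
            PySem.Str.slice ligne (some 20) none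
          else nom
        if PySem.Str.isIn ";" nom then PySem.Str.replace nom ";" "" else nom) nom
      = match xs.reverse with
        | [] => nom
        | l :: ls =>
          if PySem.Str.startswith l "COMPND" && PySem.Str.isIn "MOLECULE:" l then
            PySem.Str.replace (PySem.Str.slice l (some 20) none) ";" ""
          else
            ls.reverse.foldl (fun nom ligne =>
              let nom :=
                if PySem.Str.startswith ligne "COMPND" && PySem.Str.isIn "MOLECULE:" ligne then
                  PySem.Str.slice ligne (some 20) none
                else nom
              if PySem.Str.isIn ";" nom then PySem.Str.replace nom ";" "" else nom) nom := by
  cases hx : xs.reverse with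
  | nil => simp [List.reverse_eq_nil_iff.mp hx]
  | cons l ls =>
    have hxs : xs = ls.reverse ++ [l] := by
      have := congrArg List.reverse hx; simpa using this
    subst hxs
    rw [List.foldl_append]
    simp only [List.foldl_cons, List.foldl_nil]
    set m := ls.reverse.foldl (fun nom ligne =>
        let nom :=
          if PySem.Str.startswith ligne "COMPND" && PySem.Str.isIn "MOLECULE:" ligne then
            PySem.Str.slice ligne (some 20) none
          else nom
        if PySem.Str.isIn ";" nom then PySem.Str.replace nom ";" "" else nom) nom with hm
    have hfree : PySem.Str.isIn ";" m = false := foldl_state_semi_free _ _ h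
    by_cases hp : (PySem.Str.startswith l "COMPND" && PySem.Str.isIn "MOLECULE:" l) = true
    · rw [if_pos hp]
      simp only [hp, if_true]
      by_cases hs : PySem.Str.isIn ";" (PySem.Str.slice l (some 20) none) = true
      · rw [if_pos hs]
      · rw [if_neg hs, replace_semi_of_not_isIn _ (by simpa using hs)]
    · rw [if_neg hp]
      simp only [hp, if_false, Bool.false_eq_true]
      rw [if_neg (by simp only [hfree]; simp)]

theorem nom_prot_eq_alt (xs : List String) : nom_prot xs = nom_prot_alt xs := by
  unfold nom_prot nom_prot_alt
  induction xs using List.reverseRecOn with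
  | nil => rfl
  | append_singleton t l ih =>
    rw [foldl_eq_revScan _ _ (by decide)]
    simp only [List.reverse_append, List.reverse_cons, List.reverse_nil, List.nil_append,
      List.singleton_append, List.reverse_reverse]
    rw [show nomProtRevScan (l :: t.reverse)
          = if PySem.Str.startswith l "COMPND" && PySem.Str.isIn "MOLECULE:" l then
              PySem.Str.replace (PySem.Str.slice l (some 20) none) ";" ""
            else nomProtRevScan t.reverse from rfl]
    by_cases hp : (PySem.Str.startswith l "COMPND" && PySem.Str.isIn "MOLECULE:" l) = true
    · rw [if_pos hp, if_pos hp]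
    · rw [if_neg hp, if_neg hp]
      exact ih

-- ===== VERDICT (by name: the statement is the Claim_ definition above) =====
theorem nom_prot_spec : Claim_equal_nom_prot :=
  fun xs _ => nom_prot_eq_alt xs
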